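-- pv_equiv track=rewrite | github.com/StudyAlgorithmTeam/Season3 | 3주차 DP/김동주/extra/boj_30805.py | last_common_sequence
-- ===== SOURCE A (Python) =====
-- def last_common_sequence(A, B):
--     """사전 순 가장 나중인 공통 부분 수열을 찾는다."""
--     # 먼저 가장 큰 수부터 찾아야 한다.
--     # 동일한 수가 여럿 있다면 먼저 나오는 수를 선택해야 한다.
--     # 스택으로 활용할 것이므로 우선순위가 높은게 뒤로 가도록 정렬한다.
--     def key(x):
--         return (x[0], -x[1])
--     a_stack = sorted([(x, i) for i, x in enumerate(A)], key=key)
--     b_stack = sorted([(x, i) for i, x in enumerate(B)], key=key)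
--     ai_last = -1
--     bi_last = -1
--     while a_stack and b_stack:
--         a, ai = a_stack[-1]
--         b, bi = b_stack[-1]
--         if ai < ai_last:
--             a_stack.pop()
--             continue
--         if bi < bi_last:
--             b_stack.pop()
--             continue
--         if a == b:
--             yield a
--             ai_last = ai
--             bi_last = bi
--         if a >= b:
--             a_stack.pop()
--         if a <= b:
--             b_stack.pop()
-- ===== SOURCE B (Python) =====
-- def last_common_sequence(A, B):
--     """사전 순 가장 나중인 공통 부분 수열을 찾는다."""
--     # Greedy on suffixes: repeatedly take the largest value common to both
--     # remainders, at its earliest occurrence in each.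
--     a, b = A, B
--     while True:
--         common = [x for x in a if x in b]
--         if not common:
--             return
--         v = max(common)
--         p = a.index(v)
--         q = b.index(v)
--         a = a[p + 1:]
--         b = b[q + 1:]
--         yield v
-- ===== Notes on version B (the rewrite author's own statement) =====
-- stated objective: simpler
-- what changed: Replaced the sort-by-(value,-index) twin-stack merge with threshold indices by a direct greedy that repeatedly scans both remaining suffixes for the largest common value, cuts each suffix after its earliest occurrence, and yields it.
import Mathlib
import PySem

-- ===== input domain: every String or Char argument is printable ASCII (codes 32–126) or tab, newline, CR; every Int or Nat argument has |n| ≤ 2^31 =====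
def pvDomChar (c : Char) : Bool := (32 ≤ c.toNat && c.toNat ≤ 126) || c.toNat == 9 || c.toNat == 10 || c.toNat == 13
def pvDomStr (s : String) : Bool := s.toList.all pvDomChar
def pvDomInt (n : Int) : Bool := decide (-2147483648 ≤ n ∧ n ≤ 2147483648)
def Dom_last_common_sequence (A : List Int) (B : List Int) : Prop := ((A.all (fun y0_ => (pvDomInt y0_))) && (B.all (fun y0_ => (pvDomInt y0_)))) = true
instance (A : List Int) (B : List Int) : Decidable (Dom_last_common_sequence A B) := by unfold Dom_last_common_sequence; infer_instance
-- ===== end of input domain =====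

-- B replaces A's sort+twin-stack merge by a direct suffix-scanning greedy: simpler, not faster.
-- Both Pythons are generators; equivalence is about the yielded sequence (as a list).

-- ===== PORT A =====
-- key(x) = (x[0], -x[1]), compared as a Python tuple = lexicographic order
def pvKey (p : Int × Int) : Int ×ₗ Int := toLex (p.1, -p.2)

-- the while loop over the two stacks (list end = stack top); the two final
-- 'if a >= b: pop' / 'if a <= b: pop' are compiled by the three cases a = b
-- (pop both), b < a (pop a_stack only), a < b (pop b_stack only)
def pvLoopA (astk bstk : List (Int × Int)) (al bl : Int) : List Int :=
  match ha : astk.getLast?, hb : bstk.getLast? with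
  | some (a, ai), some (b, bi) =>
    if ai < al then pvLoopA astk.dropLast bstk al bl
    else if bi < bl then pvLoopA astk bstk.dropLast al bl
    else if a = b then a :: pvLoopA astk.dropLast bstk.dropLast ai bi
    else if b < a then pvLoopA astk.dropLast bstk al bl
    else pvLoopA astk bstk.dropLast al bl
  | _, _ => []
termination_by astk.length + bstk.length
decreasing_by
  all_goals
    obtain ⟨t, ht⟩ := List.getLast?_eq_some_iff.mp ha
    obtain ⟨u, hu⟩ := List.getLast?_eq_some_iff.mp hb
    subst ht; subst hu
    try simp [List.length_append]
    try omega

def last_common_sequence (A : List Int) (B : List Int) : List Int :=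
  pvLoopA
    (PySem.List.sorted ((PySem.List.enumerate A 0).map (fun p => (p.2, p.1))) pvKey false)
    (PySem.List.sorted ((PySem.List.enumerate B 0).map (fun p => (p.2, p.1))) pvKey false)
    (-1) (-1)

-- ===== PORT B =====
def pvLoopB (a b : List Int) : List Int :=
  match h : (a.filter (fun x => decide (x ∈ b))).max? with
  | none => []
  | some v =>
    let p := (PySem.List.index? a v).getD 0
    let q := (PySem.List.index? b v).getD 0
    v :: pvLoopB (a.drop (p + 1)) (b.drop (q + 1))
termination_by a.length
decreasing_by
  have hne : a ≠ [] := by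
    rintro rfl; simp at h
  have : 0 < a.length := List.length_pos_iff.mpr hne
  simp [List.length_drop]; omega

def last_common_sequence_alt (A : List Int) (B : List Int) : List Int :=
  pvLoopB A B

-- ===== PRECONDITION & SPEC =====
def Spec_last_common_sequence (A : List Int) (B : List Int) (out : List Int) : Prop := out = last_common_sequence_alt A B
instance (A : List Int) (B : List Int) (out : List Int) : Decidable (Spec_last_common_sequence A B out) := by unfold Spec_last_common_sequence; infer_instance

-- ===== CLAIM (what is proved, stated in full; the proofs are below) =====
def Claim_equal_last_common_sequence : Prop := ∀ (A : List Int) (B : List Int), Dom_last_common_sequence A B → Spec_last_common_sequence A B (last_common_sequence A B)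

-- ===== LEMMAS AND PROOFS =====

-- unfolding lemmas for the two loops
theorem pvLoopA_nil_left (bstk : List (Int × Int)) (al bl : Int) :
    pvLoopA [] bstk al bl = [] := by
  rw [pvLoopA]; split <;> simp_all

theorem pvLoopA_nil_right (astk : List (Int × Int)) (al bl : Int) :
    pvLoopA astk [] al bl = [] := by
  rw [pvLoopA]; split <;> simp_all

theorem pvLoopA_concat (ys zs : List (Int × Int)) (a ai b bi al bl : Int) :
    pvLoopA (ys ++ [(a, ai)]) (zs ++ [(b, bi)]) al bl =
      if ai < al then pvLoopA ys (zs ++ [(b, bi)]) al bl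
      else if bi < bl then pvLoopA (ys ++ [(a, ai)]) zs al bl
      else if a = b then a :: pvLoopA ys zs ai bi
      else if b < a then pvLoopA ys (zs ++ [(b, bi)]) al bl
      else pvLoopA (ys ++ [(a, ai)]) zs al bl := by
  rw [pvLoopA]
  split
  · simp_all [List.getLast?_concat, List.dropLast_concat]
  · next h =>
      simp only [List.getLast?_concat, Option.some.injEq, Prod.mk.injEq] at h
      exact (h a ai b bi ⟨rfl, rfl⟩ ⟨rfl, rfl⟩).elim

theorem pvLoopB_none (a b : List Int)
    (h : (a.filter (fun x => decide (x ∈ b))).max? = none) : pvLoopB a b = [] := by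
  rw [pvLoopB]; split <;> simp_all

theorem pvLoopB_some (a b : List Int) (v : Int)
    (h : (a.filter (fun x => decide (x ∈ b))).max? = some v) :
    pvLoopB a b =
      v :: pvLoopB (a.drop (((PySem.List.index? a v).getD 0) + 1))
                   (b.drop (((PySem.List.index? b v).getD 0) + 1)) := by
  rw [pvLoopB]; split <;> simp_all

-- small facts about index?
theorem pvIndex?_of_mem {l : List Int} {v : Int} (h : v ∈ l) :
    ∃ p, PySem.List.index? l v = some p := by
  have := (PySem.List.index?_isSome_iff l v).mpr h
  exact Option.isSome_iff_exists.mp this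

theorem pvIndex?_lt_length {l : List Int} {v : Int} {p : Nat}
    (h : PySem.List.index? l v = some p) : p < l.length := by
  obtain ⟨pre, suf, hl, hlen, -⟩ := (PySem.List.index?_eq_some_iff l v p).mp h
  subst hl; simp [← hlen]

theorem pvDropOffset {α : Type} (L t : List α) (k : Nat) :
    (L ++ t).drop (L.length + k) = t.drop k := by
  rw [List.drop_append, List.drop_eq_nil_of_le (Nat.le_add_right _ _), List.nil_append,
    Nat.add_sub_cancel_left]

theorem pvIndex?_split (l1 l2 : List Int) (v : Int) (hv : v ∉ l1) :
    PySem.List.index? (l1 ++ v :: l2) v = some l1.length := by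
  rw [PySem.List.index?_eq_some_iff]
  exact ⟨l1, l2, rfl, rfl, hv⟩

theorem pvIndex?_append_not_mem {l1 t : List Int} {v : Int} (hv : v ∉ l1) {r : Nat}
    (h : PySem.List.index? t v = some r) :
    PySem.List.index? (l1 ++ t) v = some (l1.length + r) := by
  obtain ⟨pre, suf, ht, hlen, hp⟩ := (PySem.List.index?_eq_some_iff t v r).mp h
  rw [PySem.List.index?_eq_some_iff]
  refine ⟨l1 ++ pre, suf, by simp [ht], by simp [hlen], ?_⟩
  simp [List.mem_append, hv, hp]

-- pvLoopB ignores an element of the first list whose value is absent from the second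
theorem pvLoopB_skip_left : ∀ (n : Nat) (l1 l2 lb : List Int) (v : Int),
    l1.length + l2.length ≤ n → v ∉ lb →
    pvLoopB (l1 ++ v :: l2) lb = pvLoopB (l1 ++ l2) lb := by
  intro n
  induction n with
  | zero =>
    intro l1 l2 lb v hn hv
    have h1 : l1 = [] := by cases l1 <;> simp_all
    have h2 : l2 = [] := by cases l2 <;> simp_all
    subst h1; subst h2
    rw [pvLoopB_none _ _ (by simp [hv]), pvLoopB_none _ _ (by simp)]
  | succ n ih =>
    intro l1 l2 lb v hn hv
    have hfil : (l1 ++ v :: l2).filter (fun x => decide (x ∈ lb))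
        = (l1 ++ l2).filter (fun x => decide (x ∈ lb)) := by
      simp [List.filter_append, hv]
    cases hmax : ((l1 ++ l2).filter (fun x => decide (x ∈ lb))).max? with
    | none => rw [pvLoopB_none _ _ (by rw [hfil, hmax]), pvLoopB_none _ _ hmax]
    | some w =>
      have hw := (List.max?_eq_some_iff.mp hmax).1
      rw [List.mem_filter] at hw
      obtain ⟨hw12, hwlb⟩ := hw
      have hwlb' : w ∈ lb := by simpa using hwlb
      have hwv : w ≠ v := fun h => hv (h ▸ hwlb')
      rw [pvLoopB_some _ _ _ (by rw [hfil, hmax]), pvLoopB_some _ _ _ hmax]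
      by_cases hw1 : w ∈ l1
      · have h1 : PySem.List.index? (l1 ++ v :: l2) w = PySem.List.index? l1 w :=
          PySem.List.index?_append_of_mem _ hw1
        have h2 : PySem.List.index? (l1 ++ l2) w = PySem.List.index? l1 w :=
          PySem.List.index?_append_of_mem _ hw1
        obtain ⟨p, hp⟩ := pvIndex?_of_mem hw1
        have hplt : p < l1.length := pvIndex?_lt_length hp
        rw [h1, h2, hp]
        have hd1 : (l1 ++ v :: l2).drop (p + 1) = l1.drop (p + 1) ++ v :: l2 :=
          List.drop_append_of_le_length (by omega)
        have hd2 : (l1 ++ l2).drop (p + 1) = l1.drop (p + 1) ++ l2 :=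
          List.drop_append_of_le_length (by omega)
        simp only [Option.getD_some, hd1, hd2]
        congr 1
        refine ih (l1.drop (p + 1)) l2 _ v ?_ ?_
        · have hdl : (l1.drop (p + 1)).length = l1.length - (p + 1) := List.length_drop
          omega
        · exact fun h => hv (List.mem_of_mem_drop h)
      · have hw2 : w ∈ l2 := by
          rcases List.mem_append.mp hw12 with h | h
          · exact absurd h hw1
          · exact h
        obtain ⟨r, hr⟩ := pvIndex?_of_mem hw2
        have hcons : PySem.List.index? (v :: l2) w = some (r + 1) := by
          rw [PySem.List.index?_cons_of_ne _ (Ne.symm hwv), hr]; rfl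
        have h1 : PySem.List.index? (l1 ++ v :: l2) w = some (l1.length + (r + 1)) :=
          pvIndex?_append_not_mem hw1 hcons
        have h2 : PySem.List.index? (l1 ++ l2) w = some (l1.length + r) :=
          pvIndex?_append_not_mem hw1 hr
        rw [h1, h2]
        simp only [Option.getD_some]
        have hd1 : (l1 ++ v :: l2).drop (l1.length + (r + 1) + 1) = l2.drop (r + 1) := by
          rw [show l1 ++ v :: l2 = (l1 ++ [v]) ++ l2 by simp,
            show l1.length + (r + 1) + 1 = (l1 ++ [v]).length + (r + 1) by simp; omega,
            pvDropOffset]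
        have hd2 : (l1 ++ l2).drop (l1.length + r + 1) = l2.drop (r + 1) := by
          rw [show l1.length + r + 1 = l1.length + (r + 1) by omega, pvDropOffset]
        rw [hd1, hd2]

-- pvLoopB ignores an element of the second list whose value is absent from the first
theorem pvLoopB_skip_right : ∀ (n : Nat) (la l1 l2 : List Int) (v : Int),
    l1.length + l2.length ≤ n → v ∉ la →
    pvLoopB la (l1 ++ v :: l2) = pvLoopB la (l1 ++ l2) := by
  intro n
  induction n with
  | zero =>
    intro la l1 l2 v hn hv
    have h1 : l1 = [] := by cases l1 <;> simp_all
    have h2 : l2 = [] := by cases l2 <;> simp_all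
    subst h1; subst h2
    rw [pvLoopB_none _ _ (by
        rw [List.max?_eq_none_iff, List.filter_eq_nil_iff]
        intro x hx
        simp only [List.nil_append, List.mem_cons, List.not_mem_nil, or_false, decide_eq_true_eq]
        exact fun h => hv (h ▸ hx)),
      pvLoopB_none _ _ (by rw [List.max?_eq_none_iff, List.filter_eq_nil_iff]; simp)]
  | succ n ih =>
    intro la l1 l2 v hn hv
    have hfil : la.filter (fun x => decide (x ∈ l1 ++ v :: l2))
        = la.filter (fun x => decide (x ∈ l1 ++ l2)) := by
      apply List.filter_congr
      intro x hx
      have hxv : x ≠ v := fun h => hv (h ▸ hx)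
      simp [List.mem_append, List.mem_cons, hxv]
    cases hmax : (la.filter (fun x => decide (x ∈ l1 ++ l2))).max? with
    | none => rw [pvLoopB_none _ _ (by rw [hfil, hmax]), pvLoopB_none _ _ hmax]
    | some w =>
      have hw := (List.max?_eq_some_iff.mp hmax).1
      rw [List.mem_filter] at hw
      obtain ⟨hwla, hw12⟩ := hw
      have hw12' : w ∈ l1 ++ l2 := by simpa using hw12
      have hwv : w ≠ v := fun h => hv (h ▸ hwla)
      rw [pvLoopB_some _ _ _ (by rw [hfil, hmax]), pvLoopB_some _ _ _ hmax]
      obtain ⟨p, hp⟩ := pvIndex?_of_mem hwla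
      rw [hp]
      by_cases hw1 : w ∈ l1
      · have h1 : PySem.List.index? (l1 ++ v :: l2) w = PySem.List.index? l1 w :=
          PySem.List.index?_append_of_mem _ hw1
        have h2 : PySem.List.index? (l1 ++ l2) w = PySem.List.index? l1 w :=
          PySem.List.index?_append_of_mem _ hw1
        obtain ⟨q, hq⟩ := pvIndex?_of_mem hw1
        have hqlt : q < l1.length := pvIndex?_lt_length hq
        rw [h1, h2, hq]
        have hd1 : (l1 ++ v :: l2).drop (q + 1) = l1.drop (q + 1) ++ v :: l2 :=
          List.drop_append_of_le_length (by omega)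
        have hd2 : (l1 ++ l2).drop (q + 1) = l1.drop (q + 1) ++ l2 :=
          List.drop_append_of_le_length (by omega)
        simp only [Option.getD_some, hd1, hd2]
        congr 1
        refine ih _ (l1.drop (q + 1)) l2 v ?_ ?_
        · have hdl : (l1.drop (q + 1)).length = l1.length - (q + 1) := List.length_drop
          omega
        · exact fun h => hv (List.mem_of_mem_drop h)
      · have hw2 : w ∈ l2 := by
          rcases List.mem_append.mp hw12' with h | h
          · exact absurd h hw1
          · exact h
        obtain ⟨r, hr⟩ := pvIndex?_of_mem hw2
        have hcons : PySem.List.index? (v :: l2) w = some (r + 1) := by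
          rw [PySem.List.index?_cons_of_ne _ (Ne.symm hwv), hr]; rfl
        have h1 : PySem.List.index? (l1 ++ v :: l2) w = some (l1.length + (r + 1)) :=
          pvIndex?_append_not_mem hw1 hcons
        have h2 : PySem.List.index? (l1 ++ l2) w = some (l1.length + r) :=
          pvIndex?_append_not_mem hw1 hr
        rw [h1, h2]
        simp only [Option.getD_some]
        have hd1 : (l1 ++ v :: l2).drop (l1.length + (r + 1) + 1) = l2.drop (r + 1) := by
          rw [show l1 ++ v :: l2 = (l1 ++ [v]) ++ l2 by simp,
            show l1.length + (r + 1) + 1 = (l1 ++ [v]).length + (r + 1) by simp; omega,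
            pvDropOffset]
        have hd2 : (l1 ++ l2).drop (l1.length + r + 1) = l2.drop (r + 1) := by
          rw [show l1.length + r + 1 = l1.length + (r + 1) by omega, pvDropOffset]
        rw [hd1, hd2]

-- facts about the sort key
theorem pvKey_lt_iff (p q : Int × Int) :
    pvKey p < pvKey q ↔ p.1 < q.1 ∨ (p.1 = q.1 ∧ q.2 < p.2) := by
  simp only [pvKey, Prod.Lex.toLex_lt_toLex]
  omega

theorem pvKey_inj {p q : Int × Int} (h : pvKey p = pvKey q) : p = q := by
  simp only [pvKey, toLex_inj, Prod.mk.injEq] at h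
  cases p; cases q; simp_all

-- invariant tying a stack + threshold to the list E of still-usable entries in index order
def StkInv (stk : List (Int × Int)) (th : Int) (E : List (Int × Int)) : Prop :=
  stk.Pairwise (fun p q => pvKey p < pvKey q) ∧
  E.Pairwise (fun p q => p.2 < q.2) ∧
  (∀ e ∈ E, th ≤ e.2) ∧
  (stk.filter (fun p => decide (th ≤ p.2))).Perm E

-- the stack top bounds every entry: largest value, and smallest index among that value
theorem pvTop_max {ys : List (Int × Int)} {a ai : Int}
    (hpw : (ys ++ [(a, ai)]).Pairwise (fun p q => pvKey p < pvKey q)) :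
    ∀ p ∈ ys ++ [(a, ai)], p.1 ≤ a ∧ (p.1 = a → ai ≤ p.2) := by
  intro p hp
  rcases List.mem_append.mp hp with h | h
  · have hk := (List.pairwise_append.mp hpw).2.2 p h (a, ai) (by simp)
    rw [pvKey_lt_iff] at hk
    rcases hk with h1 | ⟨h1, h2⟩
    · exact ⟨le_of_lt h1, fun he => absurd he (by omega)⟩
    · exact ⟨le_of_eq h1, fun _ => le_of_lt h2⟩
  · simp at h; subst h; exact ⟨le_refl _, fun _ => le_refl _⟩

theorem pvSplit_at_mem {E : List (Int × Int)} (hpw : E.Pairwise (fun p q => p.2 < q.2))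
    {a ai : Int} (hm : (a, ai) ∈ E) :
    ∃ E1 E2, E = E1 ++ (a, ai) :: E2 ∧ (∀ e ∈ E1, e.2 < ai) ∧ (∀ e ∈ E2, ai < e.2) := by
  obtain ⟨E1, E2, rfl⟩ := List.append_of_mem hm
  rw [List.pairwise_append] at hpw
  refine ⟨E1, E2, rfl, ?_, ?_⟩
  · intro e he; exact hpw.2.2 e he (a, ai) (by simp)
  · intro e he; exact (List.pairwise_cons.mp hpw.2.1).1 e he

theorem pvFilter_top_perm {ys : List (Int × Int)} {a ai th : Int} {E1 E2 : List (Int × Int)}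
    (hth : th ≤ ai)
    (hperm : ((ys ++ [(a, ai)]).filter (fun p => decide (th ≤ p.2))).Perm (E1 ++ (a, ai) :: E2)) :
    (ys.filter (fun p => decide (th ≤ p.2))).Perm (E1 ++ E2) := by
  rw [List.filter_append] at hperm
  simp only [List.filter_cons, List.filter_nil, hth, decide_true] at hperm
  have h1 := (List.perm_append_singleton _ _).symm.trans hperm
  have h2 := h1.trans List.perm_middle
  exact (List.perm_cons _).mp h2

theorem pvRefilter_perm {ys : List (Int × Int)} {th ai : Int} (h : th ≤ ai)
    {E1 E2 : List (Int × Int)}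
    (hperm : (ys.filter (fun p => decide (th ≤ p.2))).Perm (E1 ++ E2))
    (h1 : ∀ e ∈ E1, e.2 < ai) (h2 : ∀ e ∈ E2, ai < e.2) :
    (ys.filter (fun p => decide (ai ≤ p.2))).Perm E2 := by
  have step : ys.filter (fun p => decide (ai ≤ p.2))
      = (ys.filter (fun p => decide (th ≤ p.2))).filter (fun p => decide (ai ≤ p.2)) := by
    rw [List.filter_filter]
    apply List.filter_congr
    intro x hx
    by_cases hP : ai ≤ x.2
    · have hQ : th ≤ x.2 := le_trans h hP
      simp [hP, hQ]
    · simp [hP]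
  rw [step]
  have hp := hperm.filter (fun p => decide (ai ≤ p.2))
  have e1 : E1.filter (fun p => decide (ai ≤ p.2)) = [] :=
    List.filter_eq_nil_iff.mpr (by
      intro e he
      simp only [decide_eq_true_eq]
      exact fun hc => absurd hc (not_le.mpr (h1 e he)))
  have e2 : E2.filter (fun p => decide (ai ≤ p.2)) = E2 :=
    List.filter_eq_self.mpr (by
      intro e he
      simp only [decide_eq_true_eq]
      exact le_of_lt (h2 e he))
  rw [List.filter_append, e1, e2, List.nil_append] at hp
  exact hp

theorem pvLoopB_nil_left (b : List Int) : pvLoopB [] b = [] :=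
  pvLoopB_none _ _ (by simp)

theorem pvLoopB_nil_right (a : List Int) : pvLoopB a [] = [] :=
  pvLoopB_none _ _ (by rw [List.max?_eq_none_iff, List.filter_eq_nil_iff]; simp)

theorem pvLoopA_eq : ∀ (n : Nat) (astk bstk : List (Int × Int)) (al bl : Int)
    (Ea Eb : List (Int × Int)),
    astk.length + bstk.length ≤ n → StkInv astk al Ea → StkInv bstk bl Eb →
    pvLoopA astk bstk al bl = pvLoopB (Ea.map Prod.fst) (Eb.map Prod.fst) := by
  intro n
  induction n with
  | zero =>
    intro astk bstk al bl Ea Eb hn hA hB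
    have ha : astk = [] := by cases astk <;> simp_all
    subst ha
    have hEa : Ea = [] := (List.Perm.symm (by simpa using hA.2.2.2)).eq_nil
    subst hEa
    simp only [List.map_nil]
    rw [pvLoopA_nil_left, pvLoopB_nil_left]
  | succ n ih =>
    intro astk bstk al bl Ea Eb hn hA hB
    obtain ⟨hApw, hEapw, hEath, hAperm⟩ := hA
    obtain ⟨hBpw, hEbpw, hEbth, hBperm⟩ := hB
    rcases List.eq_nil_or_concat astk with ha | ⟨ys, ⟨a, ai⟩, ha⟩
    · subst ha
      have hEa : Ea = [] := (List.Perm.symm (by simpa using hAperm)).eq_nil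
      subst hEa
      simp only [List.map_nil]
      rw [pvLoopA_nil_left, pvLoopB_nil_left]
    · rcases List.eq_nil_or_concat bstk with hb | ⟨zs, ⟨b, bi⟩, hb⟩
      · subst hb
        have hEb : Eb = [] := (List.Perm.symm (by simpa using hBperm)).eq_nil
        subst hEb
        simp only [List.map_nil]
        rw [pvLoopA_nil_right, pvLoopB_nil_right]
      · rw [List.concat_eq_append] at ha hb
        subst ha; subst hb
        have hTopA := pvTop_max hApw
        have hTopB := pvTop_max hBpw
        have hlenA : (ys ++ [(a, ai)]).length = ys.length + 1 := by simp
        have hlenB : (zs ++ [(b, bi)]).length = zs.length + 1 := by simp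
        rw [pvLoopA_concat]
        by_cases h1 : ai < al
        · rw [if_pos h1]
          refine ih ys _ al bl Ea Eb (by omega) ⟨?_, hEapw, hEath, ?_⟩
            ⟨hBpw, hEbpw, hEbth, hBperm⟩
          · exact List.Pairwise.sublist (List.sublist_append_left _ _) hApw
          · rw [List.filter_append] at hAperm
            simp only [List.filter_cons, List.filter_nil, decide_eq_true_eq,
              not_le.mpr h1, if_false, List.append_nil] at hAperm
            exact hAperm
        · rw [if_neg h1]
          by_cases h2 : bi < bl
          · rw [if_pos h2]
            refine ih _ zs al bl Ea Eb (by omega) ⟨hApw, hEapw, hEath, hAperm⟩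
              ⟨?_, hEbpw, hEbth, ?_⟩
            · exact List.Pairwise.sublist (List.sublist_append_left _ _) hBpw
            · rw [List.filter_append] at hBperm
              simp only [List.filter_cons, List.filter_nil, decide_eq_true_eq,
                not_le.mpr h2, if_false, List.append_nil] at hBperm
              exact hBperm
          · rw [if_neg h2]
            have hal : al ≤ ai := not_lt.mp h1
            have hbl : bl ≤ bi := not_lt.mp h2
            have haF : (a, ai) ∈ (ys ++ [(a, ai)]).filter (fun p => decide (al ≤ p.2)) := by
              rw [List.mem_filter]
              exact ⟨by simp, by simpa using hal⟩
            have haE : (a, ai) ∈ Ea := hAperm.subset haF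
            have hbF : (b, bi) ∈ (zs ++ [(b, bi)]).filter (fun p => decide (bl ≤ p.2)) := by
              rw [List.mem_filter]
              exact ⟨by simp, by simpa using hbl⟩
            have hbE : (b, bi) ∈ Eb := hBperm.subset hbF
            obtain ⟨E1, E2, hEa, hE1, hE2⟩ := pvSplit_at_mem hEapw haE
            have hE1stk : ∀ e ∈ E1, e ∈ ys ++ [(a, ai)] := by
              intro e he
              have : e ∈ Ea := by rw [hEa]; simp [he]
              exact List.mem_of_mem_filter (hAperm.symm.subset this)
            have hE2stk : ∀ e ∈ E2, e ∈ ys ++ [(a, ai)] := by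
              intro e he
              have : e ∈ Ea := by rw [hEa]; simp [he]
              exact List.mem_of_mem_filter (hAperm.symm.subset this)
            have hEaStk : ∀ e ∈ Ea, e ∈ ys ++ [(a, ai)] := by
              intro e he
              exact List.mem_of_mem_filter (hAperm.symm.subset he)
            have hEbStk : ∀ e ∈ Eb, e ∈ zs ++ [(b, bi)] := by
              intro e he
              exact List.mem_of_mem_filter (hBperm.symm.subset he)
            have haNotE1 : a ∉ E1.map Prod.fst := by
              intro hm
              obtain ⟨e, he, hf⟩ := List.mem_map.mp hm
              have h := (hTopA e (hE1stk e he)).2 hf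
              have := hE1 e he
              omega
            by_cases h3 : a = b
            · rw [if_pos h3]
              subst h3
              obtain ⟨F1, F2, hEb, hF1, hF2⟩ := pvSplit_at_mem hEbpw hbE
              have haNotF1 : a ∉ F1.map Prod.fst := by
                intro hm
                obtain ⟨e, he, hf⟩ := List.mem_map.mp hm
                have h := (hTopB e (by
                  have : e ∈ Eb := by rw [hEb]; simp [he]
                  exact hEbStk e this)).2 hf
                have := hF1 e he
                omega
              have hmax : ((Ea.map Prod.fst).filter
                  (fun x => decide (x ∈ Eb.map Prod.fst))).max? = some a := by
                rw [List.max?_eq_some_iff]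
                constructor
                · rw [List.mem_filter]
                  refine ⟨List.mem_map.mpr ⟨(a, ai), haE, rfl⟩, ?_⟩
                  simp only [decide_eq_true_eq]
                  exact List.mem_map.mpr ⟨(a, bi), hbE, rfl⟩
                · intro x hx
                  rw [List.mem_filter] at hx
                  obtain ⟨e, he, hf⟩ := List.mem_map.mp hx.1
                  exact hf ▸ (hTopA e (hEaStk e he)).1
              rw [pvLoopB_some _ _ _ hmax]
              have hmapEa : Ea.map Prod.fst = E1.map Prod.fst ++ a :: E2.map Prod.fst := by
                rw [hEa]; simp
              have hmapEb : Eb.map Prod.fst = F1.map Prod.fst ++ a :: F2.map Prod.fst := by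
                rw [hEb]; simp
              have hidxA : PySem.List.index? (Ea.map Prod.fst) a = some (E1.map Prod.fst).length := by
                rw [hmapEa]; exact pvIndex?_split _ _ _ haNotE1
              have hidxB : PySem.List.index? (Eb.map Prod.fst) a = some (F1.map Prod.fst).length := by
                rw [hmapEb]; exact pvIndex?_split _ _ _ haNotF1
              have hdropA : (Ea.map Prod.fst).drop ((E1.map Prod.fst).length + 1)
                  = E2.map Prod.fst := by
                rw [hmapEa, show E1.map Prod.fst ++ a :: E2.map Prod.fst
                    = (E1.map Prod.fst ++ [a]) ++ E2.map Prod.fst by simp,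
                  show (E1.map Prod.fst).length + 1 = (E1.map Prod.fst ++ [a]).length + 0 by simp,
                  pvDropOffset, List.drop_zero]
              have hdropB : (Eb.map Prod.fst).drop ((F1.map Prod.fst).length + 1)
                  = F2.map Prod.fst := by
                rw [hmapEb, show F1.map Prod.fst ++ a :: F2.map Prod.fst
                    = (F1.map Prod.fst ++ [a]) ++ F2.map Prod.fst by simp,
                  show (F1.map Prod.fst).length + 1 = (F1.map Prod.fst ++ [a]).length + 0 by simp,
                  pvDropOffset, List.drop_zero]
              rw [hidxA, hidxB]
              simp only [Option.getD_some, hdropA, hdropB]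
              congr 1
              refine ih ys zs ai bi E2 F2 (by omega) ⟨?_, ?_, ?_, ?_⟩ ⟨?_, ?_, ?_, ?_⟩
              · exact List.Pairwise.sublist (List.sublist_append_left _ _) hApw
              · exact List.Pairwise.sublist (by rw [hEa]; simp) hEapw
              · exact fun e he => le_of_lt (hE2 e he)
              · exact pvRefilter_perm hal (pvFilter_top_perm hal (hEa ▸ hAperm)) hE1 hE2
              · exact List.Pairwise.sublist (List.sublist_append_left _ _) hBpw
              · exact List.Pairwise.sublist (by rw [hEb]; simp) hEbpw
              · exact fun e he => le_of_lt (hF2 e he)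
              · exact pvRefilter_perm hbl (pvFilter_top_perm hbl (hEb ▸ hBperm)) hF1 hF2
            · rw [if_neg h3]
              by_cases h4 : b < a
              · rw [if_pos h4]
                have hanb : a ∉ Eb.map Prod.fst := by
                  intro hm
                  obtain ⟨e, he, hf⟩ := List.mem_map.mp hm
                  have := (hTopB e (hEbStk e he)).1
                  omega
                have hsubE : (E1 ++ E2).Sublist Ea := by
                  rw [hEa]; exact List.Sublist.append_left (List.sublist_cons_self _ _) E1
                have hstep := ih ys _ al bl (E1 ++ E2) Eb (by omega)
                  ⟨List.Pairwise.sublist (List.sublist_append_left _ _) hApw,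
                   List.Pairwise.sublist hsubE hEapw,
                   fun e he => hEath e (hsubE.subset he),
                   pvFilter_top_perm hal (hEa ▸ hAperm)⟩
                  ⟨hBpw, hEbpw, hEbth, hBperm⟩
                rw [hstep]
                have := pvLoopB_skip_left ((E1.map Prod.fst).length + (E2.map Prod.fst).length)
                  (E1.map Prod.fst) (E2.map Prod.fst) (Eb.map Prod.fst) a (le_refl _) hanb
                rw [hEa]
                simp only [List.map_append, List.map_cons]
                rw [this]
              · rw [if_neg h4]
                have hbna : b ∉ Ea.map Prod.fst := by
                  intro hm
                  obtain ⟨e, he, hf⟩ := List.mem_map.mp hm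
                  have := (hTopA e (hEaStk e he)).1
                  omega
                obtain ⟨F1, F2, hEb, hF1, hF2⟩ := pvSplit_at_mem hEbpw hbE
                have hsubF : (F1 ++ F2).Sublist Eb := by
                  rw [hEb]; exact List.Sublist.append_left (List.sublist_cons_self _ _) F1
                have hstep := ih _ zs al bl Ea (F1 ++ F2) (by omega)
                  ⟨hApw, hEapw, hEath, hAperm⟩
                  ⟨List.Pairwise.sublist (List.sublist_append_left _ _) hBpw,
                   List.Pairwise.sublist hsubF hEbpw,
                   fun e he => hEbth e (hsubF.subset he),
                   pvFilter_top_perm hbl (hEb ▸ hBperm)⟩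
                rw [hstep]
                have := pvLoopB_skip_right ((F1.map Prod.fst).length + (F2.map Prod.fst).length)
                  (Ea.map Prod.fst) (F1.map Prod.fst) (F2.map Prod.fst) b (le_refl _) hbna
                rw [hEb]
                simp only [List.map_append, List.map_cons]
                rw [this]

theorem pvInit_inv (A : List Int) :
    StkInv (PySem.List.sorted ((PySem.List.enumerate A 0).map (fun p => (p.2, p.1))) pvKey false)
      (-1) ((PySem.List.enumerate A 0).map (fun p => (p.2, p.1))) := by
  set ent := (PySem.List.enumerate A 0).map (fun p => (p.2, p.1)) with hent
  have hperm : (PySem.List.sorted ent pvKey false).Perm ent := PySem.List.sorted_perm ent pvKey false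
  have hsnd : ∀ e ∈ ent, 0 ≤ e.2 := by
    intro e he
    obtain ⟨p, hp, rfl⟩ := List.mem_map.mp he
    obtain ⟨k, hk, rfl⟩ := (PySem.List.mem_enumerate_iff A 0 p).mp hp
    simp
  have hentpw : ent.Pairwise (fun p q => p.2 < q.2) := by
    rw [hent, List.pairwise_map]
    exact PySem.List.pairwise_lt_enumerate A 0
  have hentnd : ent.Nodup := by
    rw [List.nodup_iff_pairwise_ne]
    exact hentpw.imp (fun h => by intro he; rw [he] at h; omega)
  have hstknd : (PySem.List.sorted ent pvKey false).Nodup := hperm.nodup_iff.mpr hentnd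
  refine ⟨?_, hentpw, fun e he => le_trans (by omega) (hsnd e he), ?_⟩
  · have hle := PySem.List.sorted_pairwise ent pvKey
    have hne := List.nodup_iff_pairwise_ne.mp hstknd
    exact (hle.and hne).imp (fun ⟨h1, h2⟩ => lt_of_le_of_ne h1 (fun hk => h2 (pvKey_inj hk)))
  · rw [List.filter_eq_self.mpr (by
      intro e he
      simp only [decide_eq_true_eq]
      have := hsnd e ((PySem.List.mem_sorted ent pvKey false e).mp he)
      omega)]
    exact hperm

theorem pvEnt_values (A : List Int) :
    ((PySem.List.enumerate A 0).map (fun p => (p.2, p.1))).map Prod.fst = A := by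
  rw [List.map_map]
  exact PySem.List.map_snd_enumerate A 0

-- ===== VERDICT (by name: the statement is the Claim_ definition above) =====
theorem last_common_sequence_spec : Claim_equal_last_common_sequence := by
  unfold Claim_equal_last_common_sequence
  intro A B _
  unfold Spec_last_common_sequence last_common_sequence last_common_sequence_alt
  rw [pvLoopA_eq
    ((PySem.List.sorted ((PySem.List.enumerate A 0).map (fun p => (p.2, p.1))) pvKey false).length
      + (PySem.List.sorted ((PySem.List.enumerate B 0).map (fun p => (p.2, p.1))) pvKey false).length)
    _ _ (-1) (-1) _ _ (le_refl _) (pvInit_inv A) (pvInit_inv B), pvEnt_values, pvEnt_values]
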